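-- pv_equiv track=rewrite | github.com/rvasil/freecodecamp_pycert | projects/build-a-budget-app.py | _cat_names_listing
-- ===== SOURCE A (Python) =====
-- def _cat_names_listing(spendings):
--     max_cat_name_length = max([len(cat) for cat in spendings.keys()])
--     lines = []
--     for i in range(max_cat_name_length):
--         line = " " * 4
--         for cat in spendings.keys():
--             line += f" {cat[i]} " if len(cat) > i else " " * 3
--         lines.append(line + " " * 1)
--     return lines
-- ===== SOURCE B (Python) =====
-- def _cat_names_listing(spendings):
--     max_cat_name_length = max(len(cat) for cat in spendings.keys())
--     columns = [
--         [f" {ch} " for ch in cat] + ["   "] * (max_cat_name_length - len(cat))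
--         for cat in spendings.keys()
--     ]
--     return ["    " + "".join(row) + " " for row in zip(*columns)]
-- ===== Notes on version B (the rewrite author's own statement) =====
-- stated objective: alternative
-- what changed: B builds each category's fully padded cell column first and produces the output lines by transposing with zip(*columns), replacing A's row-major character-interleaving double loop with a column-major build plus transpose.
import Mathlib
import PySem

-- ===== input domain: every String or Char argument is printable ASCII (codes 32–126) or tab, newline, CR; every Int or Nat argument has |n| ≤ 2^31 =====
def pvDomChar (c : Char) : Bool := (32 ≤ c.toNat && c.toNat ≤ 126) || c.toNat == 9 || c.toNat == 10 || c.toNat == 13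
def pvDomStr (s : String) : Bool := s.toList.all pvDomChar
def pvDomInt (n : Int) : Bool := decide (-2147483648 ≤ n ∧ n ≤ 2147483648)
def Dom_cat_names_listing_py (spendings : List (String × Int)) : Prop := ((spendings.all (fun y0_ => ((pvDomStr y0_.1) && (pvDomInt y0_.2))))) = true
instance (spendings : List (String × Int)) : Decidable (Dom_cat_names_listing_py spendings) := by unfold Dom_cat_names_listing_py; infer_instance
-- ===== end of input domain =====

-- B builds each category's padded cell column first and then transposes with zip(*columns)
-- (column-major then transpose) instead of A's row-major interleaved loops; objective: alternative decomposition, same cost.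

-- ===== PORT A =====
-- Literal port of A: outer loop over range(max_cat_name_length) appending lines,
-- inner loop over the dict's keys extending the current line.
def cat_names_listing_py (spendings : List (String × Int)) : List String :=
  let keys : List (List Char) := (PySem.List.dedup (spendings.map Prod.fst)).map String.toList
  let m : Nat := (PySem.List.max? (keys.map List.length) (fun n => n)).getD 0
  (List.range m).foldl (fun lines i =>
    lines ++ [String.mk ((keys.foldl (fun line cat =>
        line ++ (if i < cat.length then [' ', cat.getD i ' ', ' '] else [' ', ' ', ' ']))
      [' ', ' ', ' ', ' ']) ++ [' '])]) []

-- ===== PORT B =====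
-- termination helper for pyZipStar (cited by name in decreasing_by)
theorem pvZipDec {α : Type} (cols : List (List α)) (h1 : cols ≠ [])
    (h2 : ∀ c ∈ cols, c ≠ []) :
    ((cols.map List.tail).map List.length).sum < (cols.map List.length).sum := by
  induction cols with
  | nil => exact absurd rfl h1
  | cons c cs ih =>
    simp only [List.map_cons, List.sum_cons]
    have hc : c ≠ [] := h2 c (by simp)
    have hct : c.tail.length < c.length := by
      cases c with
      | nil => exact absurd rfl hc
      | cons x xs => simp
    rcases cs with _ | ⟨d, ds⟩
    · simpa using hct
    · have hlt := ih (by simp) (fun x hx => h2 x (List.mem_cons_of_mem _ hx))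
      omega

-- zip(*columns): truncates at the first exhausted column (Python zip semantics)
def pyZipStar {α : Type} (cols : List (List α)) : List (List α) :=
  if h : (cols.isEmpty || cols.any List.isEmpty) = true then []
  else (cols.filterMap List.head?) :: pyZipStar (cols.map List.tail)
termination_by (cols.map List.length).sum
decreasing_by
  simp only [Bool.or_eq_true, List.isEmpty_iff, List.any_eq_true, not_or, not_exists] at h
  exact pvZipDec cols h.1 (fun c hc => by
    have := h.2
    push_neg at this
    simpa using (this c hc))

def cat_names_listing_py_alt (spendings : List (String × Int)) : List String :=
  let keys : List (List Char) := (PySem.List.dedup (spendings.map Prod.fst)).map String.toList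
  let m : Nat := (PySem.List.max? (keys.map List.length) (fun n => n)).getD 0
  let cols : List (List (List Char)) := keys.map (fun c =>
    c.map (fun ch => [' ', ch, ' ']) ++ List.replicate (m - c.length) [' ', ' ', ' '])
  (pyZipStar cols).map (fun row => String.mk (([' ', ' ', ' ', ' '] ++ row.flatten) ++ [' ']))

-- ===== PRECONDITION & SPEC =====
-- Pre_ excludes the empty dict, on which Python A (and B) raise ValueError from max() of an empty sequence.
def Pre_cat_names_listing_py (spendings : List (String × Int)) : Prop := spendings ≠ []
instance (spendings : List (String × Int)) : Decidable (Pre_cat_names_listing_py spendings) := by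
  unfold Pre_cat_names_listing_py; infer_instance

def pvWitness_cat_names_listing_py : (List (String × Int)) := [("food", 3), ("fun", 1)]

def Spec_cat_names_listing_py (spendings : List (String × Int)) (out : List String) : Prop := out = cat_names_listing_py_alt spendings
instance (spendings : List (String × Int)) (out : List String) : Decidable (Spec_cat_names_listing_py spendings out) := by unfold Spec_cat_names_listing_py; infer_instance

-- ===== CLAIM (what is proved, stated in full; the proofs are below) =====
def Claim_equal_cat_names_listing_py : Prop := ∀ (spendings : List (String × Int)), Dom_cat_names_listing_py spendings → Pre_cat_names_listing_py spendings → Spec_cat_names_listing_py spendings (cat_names_listing_py spendings)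

-- ===== LEMMAS AND PROOFS =====

theorem pvWitness_ok : Dom_cat_names_listing_py pvWitness_cat_names_listing_py ∧
    Pre_cat_names_listing_py pvWitness_cat_names_listing_py := by decide

-- building a PySem.Set never empties it
theorem pv_foldl_add_ne_nil {α : Type} [BEq α] (l : List α) (s : PySem.Set α) (hs : s ≠ []) :
    l.foldl PySem.Set.add s ≠ [] := by
  induction l generalizing s with
  | nil => exact hs
  | cons x xs ih =>
    refine ih _ ?_
    simp only [PySem.Set.add]
    split
    · exact hs
    · simp

theorem pv_dedup_ne_nil {α : Type} [BEq α] (l : List α) (hl : l ≠ []) :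
    PySem.List.dedup l ≠ [] := by
  cases l with
  | nil => exact absurd rfl hl
  | cons x xs =>
    have : PySem.List.dedup (x :: xs) = (x :: xs).foldl PySem.Set.add [] := by
      simp [PySem.List.dedup_eq_ofList, PySem.Set.ofList_eq_foldl]
    rw [this, List.foldl_cons]
    refine pv_foldl_add_ne_nil xs _ ?_
    simp [PySem.Set.add, PySem.Set.contains]

theorem pv_filterMap_head {α : Type} (d : α) (cols : List (List α))
    (h : ∀ c ∈ cols, c ≠ []) :
    cols.filterMap List.head? = cols.map (fun c => c.getD 0 d) := by
  induction cols with
  | nil => rfl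
  | cons c cs ih =>
    have hc : c ≠ [] := h c (by simp)
    cases c with
    | nil => exact absurd rfl hc
    | cons x xs =>
      simp only [List.filterMap_cons, List.head?, List.map_cons, List.getD, List.getElem?_cons_zero,
        Option.getD_some]
      exact congrArg _ (ih (fun c hc => h c (List.mem_cons_of_mem _ hc)))

theorem pv_zip_uniform {α : Type} (d : α) (m : Nat) :
    ∀ (cols : List (List α)), cols ≠ [] → (∀ c ∈ cols, c.length = m) →
    pyZipStar cols = (List.range m).map (fun i => cols.map (fun c => c.getD i d)) := by
  induction m with
  | zero =>
    intro cols h1 h2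
    rw [pyZipStar]
    have : (cols.isEmpty || cols.any List.isEmpty) = true := by
      cases cols with
      | nil => simp
      | cons c cs =>
        have : c = [] := List.eq_nil_of_length_eq_zero (h2 c (by simp))
        simp [this]
    simp [this]
  | succ m ih =>
    intro cols h1 h2
    have hne : ∀ c ∈ cols, c ≠ [] := by
      intro c hc h
      have := h2 c hc
      simp [h] at this
    rw [pyZipStar]
    have hcond : (cols.isEmpty || cols.any List.isEmpty) = false := by
      cases cols with
      | nil => exact absurd rfl h1
      | cons c cs =>
        simp only [List.isEmpty_cons, Bool.false_or, List.any_eq_false]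
        intro x hx
        simpa using hne x hx
    rw [hcond]
    simp only [Bool.false_eq_true, reduceDIte]
    have htail : pyZipStar (cols.map List.tail)
        = (List.range m).map (fun i => (cols.map List.tail).map (fun c => c.getD i d)) := by
      refine ih (cols.map List.tail) (by simpa using h1) ?_
      intro c hc
      rcases List.mem_map.mp hc with ⟨c0, hc0, rfl⟩
      have := h2 c0 hc0
      cases c0 with
      | nil => simp at this
      | cons x xs => simpa using this
    rw [htail, pv_filterMap_head d cols hne, List.range_succ_eq_map, List.map_cons]
    refine congrArg _ ?_
    rw [List.map_map]
    refine List.map_congr_left ?_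
    intro i _
    simp only [Function.comp]
    rw [List.map_map]
    refine List.map_congr_left ?_
    intro c hc
    have hcne := hne c hc
    cases c with
    | nil => exact absurd rfl hcne
    | cons x xs => simp [List.getD]

theorem pv_col_getD (c : List Char) (m i : Nat) (hle : c.length ≤ m) (hi : i < m) :
    ((c.map (fun ch => [' ', ch, ' ']) ++ List.replicate (m - c.length) [' ', ' ', ' ']).getD i
        ([] : List Char))
      = if i < c.length then [' ', c.getD i ' ', ' '] else [' ', ' ', ' '] := by
  by_cases h : i < c.length
  · rw [if_pos h]
    rw [List.getD_append _ _ _ _ (by simpa using h)]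
    simp [List.getD, List.getElem?_map, List.getElem?_eq_getElem h]
  · rw [if_neg h]
    push_neg at h
    rw [List.getD_append_right _ _ _ _ (by simpa using h)]
    have h2 : i - c.length < m - c.length := by omega
    simp [List.getD, List.length_map, h2]

-- ===== VERDICT (by name: the statement is the Claim_ definition above) =====
theorem cat_names_listing_py_spec : Claim_equal_cat_names_listing_py := by
  unfold Claim_equal_cat_names_listing_py
  intro spendings _ hpre
  unfold Spec_cat_names_listing_py cat_names_listing_py cat_names_listing_py_alt
  simp only []
  set keys : List (List Char) := (PySem.List.dedup (spendings.map Prod.fst)).map String.toList with hkeys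
  set m : Nat := (PySem.List.max? (keys.map List.length) (fun n => n)).getD 0 with hm
  have hkne : keys ≠ [] := by
    rw [hkeys]
    simp only [ne_eq, List.map_eq_nil_iff]
    exact pv_dedup_ne_nil _ (by simpa using hpre)
  -- every key length is at most m
  have hmax : ∀ c ∈ keys, c.length ≤ m := by
    intro c hc
    have hmem : c.length ∈ keys.map List.length := List.mem_map_of_mem hc
    rcases hx : PySem.List.max? (keys.map List.length) (fun n => n) with _ | mx
    · exact absurd ((PySem.List.max?_eq_none_iff (keys.map List.length) (fun n => n)).mp hx) (by simpa using hkne)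
    · have := PySem.List.max?_isMax hx _ hmem
      simpa [hm, hx] using this
  -- A as a map over range m
  rw [PySem.List.foldl_append_singleton_eq_map
    (fun i => String.mk ((keys.foldl (fun line cat =>
        line ++ (if i < cat.length then [' ', cat.getD i ' ', ' '] else [' ', ' ', ' ']))
      [' ', ' ', ' ', ' ']) ++ [' '])) (List.range m) []]
  -- B as a map over range m
  have hcolslen : ∀ c ∈ keys.map (fun c =>
      c.map (fun ch => [' ', ch, ' ']) ++ List.replicate (m - c.length) [' ', ' ', ' ']),
      c.length = m := by
    intro c hc
    rcases List.mem_map.mp hc with ⟨c0, hc0, rfl⟩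
    have := hmax c0 hc0
    simp only [List.length_append, List.length_map, List.length_replicate]
    omega
  rw [pv_zip_uniform ([] : List Char) m _ (by simpa using hkne) hcolslen]
  rw [List.map_map, List.nil_append]
  refine List.map_congr_left ?_
  intro i hi
  have him : i < m := List.mem_range.mp hi
  simp only [Function.comp]
  refine congrArg String.mk ?_
  rw [PySem.List.foldl_append_eq_flatMap
    (fun cat => (if i < cat.length then [' ', cat.getD i ' ', ' '] else [' ', ' ', ' '])) keys]
  rw [List.flatMap_def, List.map_map]
  refine congrArg (fun l : List (List Char) => ([' ', ' ', ' ', ' '] ++ l.flatten) ++ [' ']) ?_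
  rw [List.map_map, hkeys, List.map_map]
  refine List.map_congr_left ?_
  intro s hs
  simp only [Function.comp]
  have hmem : s.toList ∈ keys := by rw [hkeys]; exact List.mem_map_of_mem hs
  exact (pv_col_getD s.toList m i (hmax _ hmem) him).symm
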